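-- pv_equiv track=rewrite | github.com/Walsxd/Proyecto | src/algoritmos.py | DFS
-- ===== SOURCE A (Python) =====
-- def DFS(graph, start):
--     visitados = set()
--     pila = [start]
--     orden = []
--
--     while pila:
--         nodo = pila.pop()
--         if nodo not in visitados:
--             visitados.add(nodo)
--             orden.append(nodo)
--
--             # Agregamos vecinos a la pila.
--             # Invertimos el orden para que al hacer pop salga en orden alfabetico
--             vecinos = sorted(graph.get(nodo, []), key=lambda x: x[0], reverse=True)
--             for vecino, peso in vecinos:
--                 if vecino not in visitados:
--                     pila.append(vecino)
--
--     return orden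
-- ===== SOURCE B (Python) =====
-- def DFS(graph, start):
--     # Recursive DFS: the call stack replaces the explicit stack; neighbors are
--     # visited in ascending alphabetical order directly (no reverse-push trick).
--     visitados = set()
--     orden = []
--     def visitar(nodo):
--         if nodo in visitados:
--             return
--         visitados.add(nodo)
--         orden.append(nodo)
--         for vecino, _peso in sorted(graph.get(nodo, []), key=lambda x: x[0]):
--             visitar(vecino)
--     visitar(start)
--     return orden
-- ===== Notes on version B (the rewrite author's own statement) =====
-- stated objective: alternative
-- what changed: Replaces the explicit end-popped stack with reverse=True sorting and a push-time visited filter by a recursive DFS: an inner visitar(nodo) marks/records the node and recurses over its ascending-sorted neighbors, so the call stack replaces the list stack.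
import Mathlib
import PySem

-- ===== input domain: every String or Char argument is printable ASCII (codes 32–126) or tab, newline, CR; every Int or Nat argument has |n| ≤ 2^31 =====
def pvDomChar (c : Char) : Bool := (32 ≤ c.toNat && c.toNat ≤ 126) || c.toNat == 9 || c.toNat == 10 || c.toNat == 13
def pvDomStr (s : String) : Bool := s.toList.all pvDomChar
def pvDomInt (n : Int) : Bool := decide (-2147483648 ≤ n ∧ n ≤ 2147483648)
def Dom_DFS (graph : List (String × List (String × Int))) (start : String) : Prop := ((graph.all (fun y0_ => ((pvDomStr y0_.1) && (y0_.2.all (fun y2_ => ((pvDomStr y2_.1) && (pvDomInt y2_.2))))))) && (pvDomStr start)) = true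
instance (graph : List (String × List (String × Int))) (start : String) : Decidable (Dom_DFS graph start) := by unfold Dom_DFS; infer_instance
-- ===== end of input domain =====

-- B replaces the explicit end-popped stack (reverse-sorted push, push-time visited filter) by a
-- recursive DFS: visitar(nodo) marks/records the node and recurses over its ascending-sorted
-- neighbors; same return value on every input.

-- ===== PORT A =====
-- fuel bound for A's while loop: never exhausted (proved via the Φ bound below)
def pvFuel (graph : List (String × List (String × Int))) : Nat :=
  1 + (1 + (graph.map (fun p => p.2.length)).sum) * (1 + (graph.map (fun p => p.2.length)).sum)

-- 'pila' is stored top-first (head = the element Python's pila.pop() removes)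
def dfsA (graph : List (String × List (String × Int))) :
    Nat → PySem.Set String → List String → List String → List String
  | _, _, [], orden => orden
  | 0, _, _ :: _, orden => orden
  | f+1, visitados, nodo :: pila, orden =>
    if nodo ∈ visitados then
      dfsA graph f visitados pila orden
    else
      let visitados' := PySem.Set.add visitados nodo
      let orden' := orden ++ [nodo]
      let vecinos := PySem.List.sorted (PySem.Dict.getD (PySem.Dict.mk graph) nodo []) (fun x => x.1) true
      let pila' := vecinos.foldl (fun st p => if p.1 ∈ visitados' then st else p.1 :: st) pila
      dfsA graph f visitados' pila' orden'

def DFS (graph : List (String × List (String × Int))) (start : String) : List String :=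
  dfsA graph (pvFuel graph) PySem.Set.empty [start] []

-- ===== PORT B =====
-- fuel bound for the recursion depth of visitar: each nested call marks a fresh node,
-- so depth ≤ 2 + total adjacency length; never exhausted (proved below)
def pvDepth (graph : List (String × List (String × Int))) : Nat :=
  2 + (graph.map (fun p => p.2.length)).sum

-- state = (visitados, orden); 'visitar' marks the node, records it, then recurses over
-- the ascending-sorted neighbors
def visitar (graph : List (String × List (String × Int))) :
    Nat → PySem.Set String × List String → String → PySem.Set String × List String
  | 0, st, _ => st
  | f+1, st, nodo =>
    if nodo ∈ st.1 then st
    else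
      (PySem.List.sorted (PySem.Dict.getD (PySem.Dict.mk graph) nodo []) (fun x => x.1) false).foldl
        (fun acc p => visitar graph f acc p.1)
        (PySem.Set.add st.1 nodo, st.2 ++ [nodo])

def DFS_alt (graph : List (String × List (String × Int))) (start : String) : List String :=
  (visitar graph (pvDepth graph) (PySem.Set.empty, []) start).2

-- ===== PRECONDITION & SPEC =====
def Spec_DFS (graph : List (String × List (String × Int))) (start : String) (out : List String) : Prop := out = DFS_alt graph start
instance (graph : List (String × List (String × Int))) (start : String) (out : List String) : Decidable (Spec_DFS graph start out) := by unfold Spec_DFS; infer_instance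

-- ===== CLAIM (what is proved, stated in full; the proofs are below) =====
def Claim_equal_DFS : Prop := ∀ (graph : List (String × List (String × Int))) (start : String), Dom_DFS graph start → Spec_DFS graph start (DFS graph start)

-- ===== LEMMAS AND PROOFS =====

-- proof-only intermediate: a front-consumed worklist that prepends the ascending-sorted
-- neighbor names wholesale; A is proved equal to this, and B's recursion is proved equal to it too
def dfsB (graph : List (String × List (String × Int))) :
    Nat → PySem.Set String → List String → List String → List String
  | _, _, orden, [] => orden
  | 0, _, orden, _ :: _ => orden
  | f+1, visitados, orden, nodo :: resto =>
    if nodo ∈ visitados then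
      dfsB graph f visitados orden resto
    else
      dfsB graph f (PySem.Set.add visitados nodo) (orden ++ [nodo])
        (((PySem.List.sorted (PySem.Dict.getD (PySem.Dict.mk graph) nodo []) (fun x => x.1) false).map (fun p => p.1)) ++ resto)

-- ascending neighbor-name list of a node
def adjN (graph : List (String × List (String × Int))) (nodo : String) : List String :=
  (PySem.List.sorted (PySem.Dict.getD (PySem.Dict.mk graph) nodo []) (fun x => x.1) false).map (fun p => p.1)

-- total adjacency length
def totA (graph : List (String × List (String × Int))) : Nat := (graph.map (fun p => p.2.length)).sum

-- node universe: start plus every neighbor name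
def univN (graph : List (String × List (String × Int))) (start : String) : List String :=
  start :: graph.flatMap (fun p => p.2.map (fun q => q.1))

-- number of universe nodes still unvisited
def unvis (graph : List (String × List (String × Int))) (start : String) (vis : List String) : Nat :=
  ((univN graph start).filter (fun u => !(decide (u ∈ vis)))).length

-- potential: remaining worklist plus (unvisited universe) * (1 + total adjacency)
def phi (graph : List (String × List (String × Int))) (start : String)
    (vis : List String) (s : List String) : Nat :=
  s.length + (unvis graph start vis) * (1 + totA graph)

-- A's stack is B's worklist minus some already-visited entries
inductive SubVis (vis : List String) : List String → List String → Prop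
  | nil : SubVis vis [] []
  | cons (x : String) {a b : List String} : SubVis vis a b → SubVis vis (x :: a) (x :: b)
  | skip (y : String) {a b : List String} : y ∈ vis → SubVis vis a b → SubVis vis a (y :: b)

theorem subvis_mono {vis vis' : List String} (h : ∀ x, x ∈ vis → x ∈ vis') :
    ∀ {a b : List String}, SubVis vis a b → SubVis vis' a b := by
  intro a b hs
  induction hs with
  | nil => exact SubVis.nil
  | cons x _ ih => exact SubVis.cons x ih
  | skip y hy _ ih => exact SubVis.skip y (h y hy) ih

theorem subvis_filter_append {vis : List String} (L : List String) {a b : List String}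
    (h : SubVis vis a b) :
    SubVis vis (L.filter (fun v => !(decide (v ∈ vis))) ++ a) (L ++ b) := by
  induction L with
  | nil => simpa using h
  | cons v t ih =>
    by_cases hv : v ∈ vis
    · simpa [List.filter_cons, hv] using SubVis.skip v hv ih
    · simpa [List.filter_cons, hv] using SubVis.cons v ih

-- the push loop of A produces the reversed filtered name list on top of the stack
theorem foldl_push (vis' : List String) :
    ∀ (L : List (String × Int)) (pila : List String),
      L.foldl (fun st p => if p.1 ∈ vis' then st else p.1 :: st) pila
        = ((L.map (fun p => p.1)).filter (fun v => !(decide (v ∈ vis')))).reverse ++ pila := by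
  intro L
  induction L with
  | nil => intro pila; simp
  | cons p t ih =>
    intro pila
    by_cases hp : p.1 ∈ vis'
    · simp [List.foldl_cons, hp, ih]
    · simp [List.foldl_cons, hp, ih]

-- names of the reversed descending sort = names of the ascending sort
theorem names_desc_rev (l : List (String × Int)) :
    ((PySem.List.sorted l (fun x => x.1) true).map (fun p => p.1)).reverse
      = (PySem.List.sorted l (fun x => x.1) false).map (fun p => p.1) := by
  rw [← List.map_reverse]
  apply PySem.List.eq_of_perm_of_pairwise_le_of_injective (key := fun s : String => s)
    (fun a b h => h)
  · exact (((PySem.List.sorted l (fun x => x.1) true).reverse_perm.trans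
      (PySem.List.sorted_perm l (fun x => x.1) true)).trans
      (PySem.List.sorted_perm l (fun x => x.1) false).symm).map _
  · rw [List.map_reverse, List.pairwise_reverse]
    exact (PySem.List.sorted_pairwise_rev l (fun x => x.1)).map
      (f := fun p : String × Int => p.1) (fun {a b} h => h)
  · exact (PySem.List.sorted_pairwise l (fun x => x.1)).map
      (f := fun p : String × Int => p.1) (fun {a b} h => h)

-- any adjacency list looked up is at most the total adjacency length
theorem getD_len_le (graph : List (String × List (String × Int))) (x : String) :
    (PySem.Dict.getD (PySem.Dict.mk graph) x []).length ≤ totA graph := by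
  induction graph with
  | nil => simp [PySem.Dict.getD, PySem.Dict.get?, totA]
  | cons p t ih =>
    obtain ⟨k, l⟩ := p
    by_cases h : k = x
    · subst h
      simp [totA, PySem.Dict.getD, PySem.Dict.get?_mk_cons]
    · have hne : (k == x) = false := by simpa using h
      have : (PySem.Dict.getD (PySem.Dict.mk t) x []).length ≤ totA t := ih
      simp only [PySem.Dict.getD, PySem.Dict.get?_mk_cons, hne, Bool.false_eq_true,
        if_false, totA, List.map_cons, List.sum_cons] at *
      omega

theorem adjN_len_le (graph : List (String × List (String × Int))) (x : String) :
    (adjN graph x).length ≤ totA graph := by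
  simpa [adjN, PySem.List.length_sorted] using getD_len_le graph x

-- a member of the looked-up adjacency list comes from some entry of the graph
theorem getD_sub (x : String) (graph : List (String × List (String × Int))) :
    ∀ p, p ∈ PySem.Dict.getD (PySem.Dict.mk graph) x [] → ∃ l, (x, l) ∈ graph ∧ p ∈ l := by
  induction graph with
  | nil => intro p hp; simp [PySem.Dict.getD, PySem.Dict.get?] at hp
  | cons q t ih =>
    obtain ⟨k, al⟩ := q
    intro p hp
    by_cases h : k = x
    · subst h
      refine ⟨al, List.mem_cons_self, ?_⟩
      simpa [PySem.Dict.getD, PySem.Dict.get?_mk_cons] using hp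
    · have hne : (k == x) = false := by simpa using h
      simp only [PySem.Dict.getD, PySem.Dict.get?_mk_cons, hne, Bool.false_eq_true,
        if_false] at hp
      obtain ⟨l, hl, hpl⟩ := ih p (by simpa [PySem.Dict.getD] using hp)
      exact ⟨l, List.mem_cons_of_mem _ hl, hpl⟩

theorem adjN_sub_univ (graph : List (String × List (String × Int))) (start : String) (x : String) :
    ∀ y ∈ adjN graph x, y ∈ univN graph start := by
  intro y hy
  simp only [adjN, List.mem_map] at hy
  obtain ⟨p, hp, rfl⟩ := hy
  have hp' : p ∈ PySem.Dict.getD (PySem.Dict.mk graph) x [] :=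
    (PySem.List.mem_sorted _ _ _ _).1 hp
  obtain ⟨l, hl, hpl⟩ := getD_sub x graph p hp'
  apply List.mem_cons_of_mem
  exact List.mem_flatMap.2 ⟨(x, l), hl, List.mem_map.2 ⟨p, hpl, rfl⟩⟩

theorem filter_len_lt {vis : List String} {x : String} (U : List String)
    (hxU : x ∈ U) (hxv : x ∉ vis) :
    (U.filter (fun u => !(decide (u ∈ vis ++ [x])))).length + 1
      ≤ (U.filter (fun u => !(decide (u ∈ vis)))).length := by
  have hx2 : x ∈ U.filter (fun u => !(decide (u ∈ vis))) :=
    List.mem_filter.2 ⟨hxU, by simpa using hxv⟩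
  have hlt : ((U.filter (fun u => !(decide (u ∈ vis)))).filter (fun u => !(decide (u = x)))).length
      < (U.filter (fun u => !(decide (u ∈ vis)))).length :=
    List.length_filter_lt_length_iff_exists.2 ⟨x, hx2, by simp⟩
  have heq : (U.filter (fun u => !(decide (u ∈ vis)))).filter (fun u => !(decide (u = x)))
      = U.filter (fun u => !(decide (u ∈ vis ++ [x]))) := by
    rw [List.filter_filter]
    apply List.filter_congr
    intro u _
    by_cases h1 : u ∈ vis <;> by_cases h2 : u = x <;> simp [h1, h2]
  rw [heq] at hlt
  omega

-- shrinking the visited set can only grow the unvisited count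
theorem unvis_anti (graph : List (String × List (String × Int))) (start : String)
    {vis vis' : List String} (h : ∀ x, x ∈ vis → x ∈ vis') :
    unvis graph start vis' ≤ unvis graph start vis := by
  unfold unvis
  induction univN graph start with
  | nil => simp
  | cons u t ih =>
    by_cases h2 : u ∈ vis
    · have h1 : u ∈ vis' := h u h2
      simp only [List.filter_cons, h2, h1, decide_true, Bool.not_true, Bool.false_eq_true,
        if_false]
      exact ih
    · by_cases h1 : u ∈ vis'
      · simp only [List.filter_cons, h2, h1, decide_true, decide_false, Bool.not_true,
          Bool.not_false, Bool.false_eq_true, if_false, if_true, List.length_cons]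
        omega
      · simp only [List.filter_cons, h2, h1, decide_false, Bool.not_false, if_true,
          List.length_cons]
        omega

-- generic foldl invariant preservation
theorem foldl_pres {α β : Type} (g : α → β → α) (P : α → Prop)
    (h : ∀ st b, P st → P (g st b)) :
    ∀ (L : List β) (st : α), P st → P (L.foldl g st) := by
  intro L
  induction L with
  | nil => intro st hst; simpa using hst
  | cons b t ih => intro st hst; exact ih (g st b) (h st b hst)

-- generic foldl congruence under an invariant
theorem foldl_congr_inv {α β : Type} (g h : α → β → α) (P : α → Prop)
    (hpres : ∀ st b, P st → P (g st b)) :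
    ∀ (L : List β) (st : α), P st → (∀ st' b, P st' → b ∈ L → g st' b = h st' b) →
      L.foldl g st = L.foldl h st := by
  intro L
  induction L with
  | nil => intro st _ _; rfl
  | cons b t ih =>
    intro st hst heq
    have h1 : g st b = h st b := heq st b hst List.mem_cons_self
    simp only [List.foldl_cons, h1]
    rw [← h1]
    exact ih (g st b) (hpres st b hst) (fun st' c hst' hc => heq st' c hst' (List.mem_cons_of_mem _ hc))

-- visitar only grows the visited set
theorem visitar_vis_mono (graph : List (String × List (String × Int))) :
    ∀ (f : Nat) (st : PySem.Set String × List String) (n : String) (x : String),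
      x ∈ st.1 → x ∈ (visitar graph f st n).1 := by
  intro f
  induction f with
  | zero => intro st n x hx; simpa [visitar] using hx
  | succ f ih =>
    intro st n x hx
    by_cases hn : n ∈ st.1
    · simpa [visitar, hn] using hx
    · simp only [visitar, hn, if_false]
      apply foldl_pres _ (fun s => x ∈ s.1) (fun s p hs => ih s p.1 x hs)
      simpa [PySem.Set.mem_add] using Or.inl hx

-- fuel monotonicity for visitar at states with enough fuel
theorem visitar_fuel_succ (graph : List (String × List (String × Int))) (start : String) :
    ∀ (f : Nat) (st : PySem.Set String × List String) (n : String),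
      n ∈ univN graph start → unvis graph start st.1 + 1 ≤ f →
      visitar graph f st n = visitar graph (f+1) st n := by
  intro f
  induction f with
  | zero => intro st n _ h; omega
  | succ f ih =>
    intro st n hnU hf
    by_cases hn : n ∈ st.1
    · simp [visitar, hn]
    · simp only [visitar, hn, if_false]
      have hadd : PySem.Set.add st.1 n = st.1 ++ [n] := PySem.Set.add_of_not_mem hn
      have hdec : unvis graph start (st.1 ++ [n]) + 1 ≤ unvis graph start st.1 :=
        filter_len_lt (univN graph start) hnU hn
      apply foldl_congr_inv
        (fun (acc : PySem.Set String × List String) (p : String × Int) => visitar graph f acc p.1)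
        (fun (acc : PySem.Set String × List String) (p : String × Int) => visitar graph (f+1) acc p.1)
        (fun (s : PySem.Set String × List String) => unvis graph start s.1 + 1 ≤ f)
      · intro s p hs
        have := unvis_anti graph start (vis := s.1) (vis' := (visitar graph f s p.1).1)
          (fun x hx => visitar_vis_mono graph f s p.1 x hx)
        omega
      · show unvis graph start (PySem.Set.add st.1 n) + 1 ≤ f
        rw [hadd]; omega
      · intro st' p hst' hp
        have hpu : p.1 ∈ adjN graph n := List.mem_map.2 ⟨p, hp, rfl⟩
        exact ih st' p.1 (adjN_sub_univ graph start n p.1 hpu) hst'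

-- folding visitar over a worklist equals the front-consumed worklist run
theorem fold_visitar_eq_dfsB (graph : List (String × List (String × Int))) (start : String) :
    ∀ (fB : Nat), ∀ (f : Nat) (vis : List String) (orden pend : List String),
      phi graph start vis pend ≤ fB →
      (∀ x ∈ pend, x ∈ univN graph start) →
      unvis graph start vis + 1 ≤ f →
      (pend.foldl (fun st n => visitar graph f st n) (vis, orden)).2
        = dfsB graph fB vis orden pend := by
  intro fB
  induction fB using Nat.strong_induction_on with
  | _ fB ih =>
    intro f vis orden pend hphi hU hf
    match pend with
    | [] => cases fB <;> simp [dfsB]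
    | n :: rest =>
      have h1 : 1 ≤ phi graph start vis (n :: rest) := by simp [phi]; omega
      obtain ⟨g, rfl⟩ : ∃ g, fB = g + 1 := ⟨fB - 1, by omega⟩
      obtain ⟨f', rfl⟩ : ∃ f', f = f' + 1 := ⟨f - 1, by omega⟩
      by_cases hn : n ∈ vis
      · have hv : visitar graph (f'+1) (vis, orden) n = (vis, orden) := by
          simp [visitar, hn]
        simp only [List.foldl_cons, hv, dfsB, hn, if_true]
        apply ih g (by omega) (f'+1) vis orden rest ?_
          (fun x hx => hU x (List.mem_cons_of_mem _ hx)) hf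
        simp only [phi, List.length_cons] at hphi ⊢; omega
      · have hnU : n ∈ univN graph start := hU n List.mem_cons_self
        have hadd : PySem.Set.add vis n = vis ++ [n] := PySem.Set.add_of_not_mem hn
        have hdec : unvis graph start (vis ++ [n]) + 1 ≤ unvis graph start vis :=
          filter_len_lt (univN graph start) hnU hn
        have hv : visitar graph (f'+1) (vis, orden) n
            = (adjN graph n).foldl (fun st m => visitar graph f' st m) (vis ++ [n], orden ++ [n]) := by
          simp only [visitar, hn, if_false, hadd]
          rw [adjN, List.foldl_map]
        simp only [List.foldl_cons, hv]
        have hP0 : unvis graph start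
            ((adjN graph n).foldl (fun st m => visitar graph f' st m) (vis ++ [n], orden ++ [n])).1 + 1 ≤ f' := by
          apply foldl_pres
            (fun (st : PySem.Set String × List String) (m : String) => visitar graph f' st m)
            (fun (s : PySem.Set String × List String) => unvis graph start s.1 + 1 ≤ f')
          · intro s m hs
            have := unvis_anti graph start (vis := s.1) (vis' := (visitar graph f' s m).1)
              (fun x hx => visitar_vis_mono graph f' s m x hx)
            omega
          · show unvis graph start (vis ++ [n]) + 1 ≤ f'
            omega
        -- lift rest's fuel f'+1 down to f' pointwise, then recurse
        have hrest : rest.foldl (fun st m => visitar graph (f'+1) st m)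
              ((adjN graph n).foldl (fun st m => visitar graph f' st m) (vis ++ [n], orden ++ [n]))
            = rest.foldl (fun st m => visitar graph f' st m)
              ((adjN graph n).foldl (fun st m => visitar graph f' st m) (vis ++ [n], orden ++ [n])) := by
          apply foldl_congr_inv
            (fun (st : PySem.Set String × List String) (m : String) => visitar graph (f'+1) st m)
            (fun (st : PySem.Set String × List String) (m : String) => visitar graph f' st m)
            (fun (s : PySem.Set String × List String) => unvis graph start s.1 + 1 ≤ f')
          · intro s m hs
            have := unvis_anti graph start (vis := s.1) (vis' := (visitar graph (f'+1) s m).1)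
              (fun x hx => visitar_vis_mono graph (f'+1) s m x hx)
            omega
          · exact hP0
          · intro st' m hst' hm
            exact (visitar_fuel_succ graph start f' st' m
              (hU m (List.mem_cons_of_mem _ hm)) hst').symm
        rw [hrest, ← List.foldl_append]
        have hgoal := ih g (by omega) f' (vis ++ [n]) (orden ++ [n]) (adjN graph n ++ rest) ?_ ?_ ?_
        · simpa [dfsB, hn, hadd, adjN] using hgoal
        · have hlen : (adjN graph n).length ≤ totA graph := adjN_len_le graph n
          simp only [phi, List.length_cons, List.length_append] at hphi ⊢
          nlinarith [hphi, hdec, hlen]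
        · intro y hy
          rcases List.mem_append.1 hy with h | h
          · exact adjN_sub_univ graph start n y h
          · exact hU y (List.mem_cons_of_mem _ h)
        · omega

-- the main simulation: A's stack run equals the worklist run
theorem main_sim (graph : List (String × List (String × Int))) (start : String) :
    ∀ (fB : Nat), ∀ (fA : Nat) (vis : List String) (pila pend orden : List String),
      phi graph start vis pend ≤ fB → fB ≤ fA →
      (∀ x ∈ pend, x ∈ univN graph start) →
      SubVis vis pila pend →
      dfsA graph fA vis pila orden = dfsB graph fB vis orden pend := by
  intro fB
  induction fB using Nat.strong_induction_on with
  | _ fB ih =>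
    intro fA vis pila pend orden hphi hle hU hsv
    cases hsv with
    | nil =>
      cases fA <;> cases fB <;> simp [dfsA, dfsB]
    | @cons x a b hab =>
      have h1 : 1 ≤ phi graph start vis (x :: b) := by simp [phi]; omega
      obtain ⟨g, rfl⟩ : ∃ g, fB = g + 1 := ⟨fB - 1, by omega⟩
      obtain ⟨f, rfl⟩ : ∃ f, fA = f + 1 := ⟨fA - 1, by omega⟩
      by_cases hx : x ∈ vis
      · simp only [dfsA, dfsB, if_pos hx]
        apply ih g (by omega) f vis a b orden ?_ (by omega)
          (fun y hy => hU y (List.mem_cons_of_mem _ hy)) hab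
        simp only [phi, List.length_cons] at hphi ⊢; omega
      · simp only [dfsA, dfsB, if_neg hx]
        have hadd : PySem.Set.add vis x = vis ++ [x] := PySem.Set.add_of_not_mem hx
        rw [hadd, foldl_push, ← List.filter_reverse, names_desc_rev]
        have hsv' : SubVis (vis ++ [x])
            (((PySem.List.sorted (PySem.Dict.getD (PySem.Dict.mk graph) x []) (fun p => p.1) false).map (fun p => p.1)).filter (fun v => !(decide (v ∈ vis ++ [x]))) ++ a)
            (((PySem.List.sorted (PySem.Dict.getD (PySem.Dict.mk graph) x []) (fun p => p.1) false).map (fun p => p.1)) ++ b) := by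
          apply subvis_filter_append
          exact subvis_mono (fun y hy => List.mem_append_left _ hy) hab
        apply ih g (by omega) f (vis ++ [x]) _ _ _ ?_ (by omega) ?_ hsv'
        · -- potential decreases
          have hxmem : x ∈ univN graph start := hU x List.mem_cons_self
          have hdec := filter_len_lt (univN graph start) hxmem hx
          have hlen : (adjN graph x).length ≤ totA graph := adjN_len_le graph x
          simp only [phi, unvis, List.length_cons, List.length_append] at hphi ⊢
          simp only [adjN] at hlen
          set c1 := ((univN graph start).filter (fun u => !(decide (u ∈ vis ++ [x])))).length
          set c0 := ((univN graph start).filter (fun u => !(decide (u ∈ vis)))).length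
          set m := ((PySem.List.sorted (PySem.Dict.getD (PySem.Dict.mk graph) x []) (fun p => p.1) false).map (fun p => p.1)).length
          have : m ≤ totA graph := hlen
          nlinarith [hphi, hdec, this]
        · intro y hy
          rcases List.mem_append.1 hy with h | h
          · exact adjN_sub_univ graph start x y (by simpa [adjN] using h)
          · exact hU y (List.mem_cons_of_mem _ h)
    | @skip y a b hy hab =>
      have h1 : 1 ≤ phi graph start vis (y :: b) := by simp [phi]; omega
      obtain ⟨g, rfl⟩ : ∃ g, fB = g + 1 := ⟨fB - 1, by omega⟩
      have hgA : dfsB graph (g+1) vis orden (y :: b) = dfsB graph g vis orden b := by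
        simp [dfsB, hy]
      rw [hgA]
      apply ih g (by omega) fA vis pila b orden ?_ (by omega)
        (fun z hz => hU z (List.mem_cons_of_mem _ hz)) hab
      simp only [phi, List.length_cons] at hphi ⊢; omega

theorem univ_len (graph : List (String × List (String × Int))) (start : String) :
    (univN graph start).length = 1 + totA graph := by
  simp only [univN, totA, List.length_cons, List.length_flatMap]
  simp only [List.length_map]
  omega

theorem unvis_empty (graph : List (String × List (String × Int))) (start : String) :
    unvis graph start [] = 1 + totA graph := by
  unfold unvis
  rw [List.filter_eq_self.2 (by simp), univ_len]

theorem phi_init (graph : List (String × List (String × Int))) (start : String) :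
    phi graph start [] [start] ≤ pvFuel graph := by
  simp only [phi, List.length_cons, List.length_nil, unvis_empty, pvFuel, totA]
  nlinarith

-- ===== VERDICT (by name: the statement is the Claim_ definition above) =====
theorem DFS_spec : Claim_equal_DFS := by
  intro graph start _
  show DFS graph start = DFS_alt graph start
  have hA : DFS graph start = dfsB graph (pvFuel graph) PySem.Set.empty [] [start] := by
    unfold DFS
    apply main_sim graph start (pvFuel graph) (pvFuel graph) PySem.Set.empty [start] [start] []
      (phi_init graph start) le_rfl
      (fun x hx => by simpa [univN] using Or.inl (List.mem_singleton.1 hx))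
      (SubVis.cons start SubVis.nil)
  have hB : ([start].foldl (fun st n => visitar graph (pvDepth graph) st n)
        ((PySem.Set.empty : PySem.Set String), ([] : List String))).2
      = dfsB graph (pvFuel graph) PySem.Set.empty [] [start] := by
    apply fold_visitar_eq_dfsB graph start (pvFuel graph) (pvDepth graph)
      PySem.Set.empty [] [start] (phi_init graph start)
      (fun x hx => by simpa [univN] using Or.inl (List.mem_singleton.1 hx))
    rw [show (PySem.Set.empty : PySem.Set String) = ([] : List String) from rfl, unvis_empty]
    simp [pvDepth, totA]
  rw [hA, ← hB]
  simp [DFS_alt]
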